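-- pv_equiv track=rewrite | github.com/trl-lab/SQaLe-Text-to-SQL-Generation | create_questions.py | nearest_join_with_examples
-- ===== SOURCE A (Python) =====
-- from typing import List, Tuple, Dict, Optional
--
-- def nearest_join_with_examples(target_j: int, buckets: Dict[int, List[str]]) -> Optional[int]:
--     """Find the closest j' that has at least one example; returns None if none exist."""
--     if buckets.get(target_j):
--         return target_j
--     diffs = sorted(range(0, 11), key=lambda x: (abs(x - target_j), x))
--     for j in diffs:
--         if buckets.get(j):
--             return j
--     return None
-- ===== SOURCE B (Python) =====
-- from typing import List, Dict, Optional
--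
-- def nearest_join_with_examples(target_j: int, buckets: Dict[int, List[str]]) -> Optional[int]:
--     """Single ascending min-scan over 0..10 instead of sorting the candidates."""
--     if buckets.get(target_j):
--         return target_j
--     best = None
--     for j in range(0, 11):
--         if buckets.get(j):
--             if best is None or abs(j - target_j) < abs(best - target_j):
--                 best = j
--     return best
-- ===== Notes on version B (the rewrite author's own statement) =====
-- stated objective: simpler
-- what changed: Replaces A's sort of the 11 candidate indices by (abs(x-target), x) followed by a first-hit scan with a single ascending min-scan over range(0,11) that keeps the non-empty bucket index with the strictly smallest distance (ascending order makes ties resolve to the smaller index automatically).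
import Mathlib
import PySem

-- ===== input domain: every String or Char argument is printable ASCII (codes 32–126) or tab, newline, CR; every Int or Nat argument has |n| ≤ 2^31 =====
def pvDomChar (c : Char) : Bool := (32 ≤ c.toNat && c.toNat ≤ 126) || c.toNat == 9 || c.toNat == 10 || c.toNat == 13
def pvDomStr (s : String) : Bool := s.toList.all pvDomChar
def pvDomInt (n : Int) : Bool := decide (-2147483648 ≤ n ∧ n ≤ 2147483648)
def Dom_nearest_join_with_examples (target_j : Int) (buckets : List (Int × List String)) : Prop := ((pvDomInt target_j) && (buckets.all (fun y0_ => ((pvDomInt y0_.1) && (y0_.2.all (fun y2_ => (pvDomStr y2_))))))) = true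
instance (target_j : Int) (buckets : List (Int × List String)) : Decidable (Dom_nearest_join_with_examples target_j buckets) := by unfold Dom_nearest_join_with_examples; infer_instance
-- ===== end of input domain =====

-- B replaces A's sort-then-scan of the candidate indices 0..10 by a single ascending
-- min-scan keeping the strictly closest non-empty bucket (objective: simpler).

-- ===== PORT A =====
-- shared primitive: truthiness of buckets.get(j) (None or empty list is falsy)
def pvGetTruthy (buckets : List (Int × List String)) (j : Int) : Bool :=
  match (PySem.Dict.mk buckets).get? j with
  | none => false
  | some l => !l.isEmpty

def nearest_join_with_examples (target_j : Int) (buckets : List (Int × List String)) : Option Int :=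
  if pvGetTruthy buckets target_j then some target_j
  else
    let diffs := PySem.List.sorted2 (PySem.List.pyRange 0 11 1) (fun x => |x - target_j|) (fun x => x)
    diffs.find? (fun j => pvGetTruthy buckets j)

-- ===== PORT B =====
def nearest_join_with_examples_alt (target_j : Int) (buckets : List (Int × List String)) : Option Int :=
  if pvGetTruthy buckets target_j then some target_j
  else
    (PySem.List.pyRange 0 11 1).foldl
      (fun best j =>
        if pvGetTruthy buckets j then
          match best with
          | none => some j
          | some b => if |j - target_j| < |b - target_j| then some j else best
        else best) none

-- ===== PRECONDITION & SPEC =====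
def Spec_nearest_join_with_examples (target_j : Int) (buckets : List (Int × List String)) (out : Option Int) : Prop := out = nearest_join_with_examples_alt target_j buckets
instance (target_j : Int) (buckets : List (Int × List String)) (out : Option Int) : Decidable (Spec_nearest_join_with_examples target_j buckets out) := by unfold Spec_nearest_join_with_examples; infer_instance

-- ===== CLAIM (what is proved, stated in full; the proofs are below) =====
def Claim_equal_nearest_join_with_examples : Prop := ∀ (target_j : Int) (buckets : List (Int × List String)), Dom_nearest_join_with_examples target_j buckets → Spec_nearest_join_with_examples target_j buckets (nearest_join_with_examples target_j buckets)

-- ===== LEMMAS AND PROOFS =====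

-- Python's tuple order (abs(x-t), x), as a strict order on candidate indices
def pvKlt (t a b : Int) : Prop := |a - t| < |b - t| ∨ (|a - t| = |b - t| ∧ a < b)

-- the tuple key encoded as one Int (valid on 0..10, where the second component fits in *16)
def pvK (t j : Int) : Int := |j - t| * 16 + j

lemma pvRange_eq : PySem.List.pyRange 0 11 1 = [0,1,2,3,4,5,6,7,8,9,10] := by decide

lemma insertBy_congr_on (f g : Int → Int → Bool) (x : Int) :
    ∀ (acc : List Int), (∀ b ∈ acc, f x b = g x b) →
      PySem.List.insertBy f x acc = PySem.List.insertBy g x acc := by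
  intro acc
  induction acc with
  | nil => intro _; rfl
  | cons y ys ih =>
    intro h
    simp only [PySem.List.insertBy]
    rw [h y (by simp)]
    by_cases hg : g x y = true
    · simp [hg]
    · simp only [Bool.not_eq_true] at hg
      simp [hg, ih (fun b hb => h b (by simp [hb]))]

lemma foldl_insertBy_congr (P : Int → Prop) (f g : Int → Int → Bool)
    (hfg : ∀ a b, P a → P b → f a b = g a b) :
    ∀ (xs acc : List Int), (∀ a ∈ xs, P a) → (∀ b ∈ acc, P b) →
      xs.foldl (fun acc x => PySem.List.insertBy f x acc) acc
        = xs.foldl (fun acc x => PySem.List.insertBy g x acc) acc := by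
  intro xs
  induction xs with
  | nil => intro acc _ _; rfl
  | cons x xs ih =>
    intro acc hxs hacc
    simp only [List.foldl_cons]
    rw [insertBy_congr_on f g x acc (fun b hb => hfg x b (hxs x (by simp)) (hacc b hb))]
    apply ih
    · exact fun a ha => hxs a (by simp [ha])
    · intro b hb
      rw [PySem.List.mem_insertBy] at hb
      rcases hb with rfl | hb
      · exact hxs b (by simp)
      · exact hacc b hb

lemma sorted2_eq_sortedK (t : Int) :
    PySem.List.sorted2 (PySem.List.pyRange 0 11 1) (fun x => |x - t|) (fun x => x)
      = PySem.List.sorted (PySem.List.pyRange 0 11 1) (pvK t) := by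
  show (PySem.List.pyRange 0 11 1).foldl
      (fun acc x => PySem.List.insertBy
        (fun a b => decide (|a - t| < |b - t|) || (!decide (|b - t| < |a - t|) && decide (a < b))) x acc) []
    = (PySem.List.pyRange 0 11 1).foldl
      (fun acc x => PySem.List.insertBy (fun a b => decide (pvK t a < pvK t b)) x acc) []
  apply foldl_insertBy_congr (fun a => 0 ≤ a ∧ a ≤ 10)
  · intro a b ha hb
    rw [Bool.eq_iff_iff]
    simp only [Bool.or_eq_true, Bool.and_eq_true, Bool.not_eq_true', decide_eq_true_eq,
      decide_eq_false_iff_not, pvK]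
    rcases abs_cases (a - t) with ⟨h1, _⟩ | ⟨h1, _⟩ <;>
      rcases abs_cases (b - t) with ⟨h2, _⟩ | ⟨h2, _⟩ <;>
      rw [h1, h2] <;> omega
  · rw [pvRange_eq]; decide
  · intro b hb; simp at hb

lemma sortedK_pairwise (t : Int) :
    (PySem.List.sorted (PySem.List.pyRange 0 11 1) (pvK t)).Pairwise (pvKlt t) := by
  have hperm := PySem.List.sorted_perm (PySem.List.pyRange 0 11 1) (pvK t) false
  have hle := PySem.List.sorted_pairwise (xs := PySem.List.pyRange 0 11 1) (key := pvK t)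
  have hnd : (PySem.List.sorted (PySem.List.pyRange 0 11 1) (pvK t)).Nodup :=
    hperm.symm.nodup (by rw [pvRange_eq]; decide)
  have hcomb := hle.and hnd
  refine hcomb.imp_of_mem ?_
  rintro a b ha hb ⟨h1, h2⟩
  have ha' : 0 ≤ a ∧ a < 11 := PySem.List.mem_pyRange_one.mp (hperm.mem_iff.mp ha)
  have hb' : 0 ≤ b ∧ b < 11 := PySem.List.mem_pyRange_one.mp (hperm.mem_iff.mp hb)
  unfold pvK at h1
  unfold pvKlt
  rcases abs_cases (a - t) with ⟨e1, _⟩ | ⟨e1, _⟩ <;>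
    rcases abs_cases (b - t) with ⟨e2, _⟩ | ⟨e2, _⟩ <;>
    rw [e1, e2] at h1 ⊢ <;> omega

lemma find?_char (t : Int) (g : Int → Bool) :
    ∀ (S : List Int), S.Pairwise (pvKlt t) →
      (∀ m, S.find? g = some m → g m = true ∧ m ∈ S ∧ ∀ x ∈ S, g x = true → x = m ∨ pvKlt t m x) ∧
      (S.find? g = none → ∀ x ∈ S, g x = false) := by
  intro S
  induction S with
  | nil => intro _; exact ⟨by simp, by simp⟩
  | cons a S ih =>
    intro hp
    rw [List.pairwise_cons] at hp
    obtain ⟨hhead, htail⟩ := hp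
    by_cases hga : g a = true
    · refine ⟨?_, ?_⟩
      · intro m hm
        rw [List.find?_cons_of_pos hga] at hm
        injection hm with hm; subst hm
        refine ⟨hga, by simp, ?_⟩
        intro x hx _
        rcases List.mem_cons.mp hx with rfl | hx
        · exact Or.inl rfl
        · exact Or.inr (hhead x hx)
      · intro hnone
        rw [List.find?_cons_of_pos hga] at hnone
        exact absurd hnone (by simp)
    · have hga' : g a = false := by simpa using hga
      obtain ⟨ihs, ihn⟩ := ih htail
      refine ⟨?_, ?_⟩
      · intro m hm
        rw [List.find?_cons_of_neg (by simp [hga'])] at hm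
        obtain ⟨h1, h2, h3⟩ := ihs m hm
        refine ⟨h1, List.mem_cons.mpr (Or.inr h2), ?_⟩
        intro x hx hgx
        rcases List.mem_cons.mp hx with rfl | hx
        · rw [hga'] at hgx; exact absurd hgx (by simp)
        · exact h3 x hx hgx
      · intro hnone
        rw [List.find?_cons_of_neg (by simp [hga'])] at hnone
        intro x hx
        rcases List.mem_cons.mp hx with rfl | hx
        · exact hga'
        · exact ihn hnone x hx

lemma foldl_char (t : Int) (g : Int → Bool) :
    ∀ (L : List Int) (acc : Option Int), L.Pairwise (· < ·) →
      (∀ b, acc = some b → g b = true ∧ ∀ x ∈ L, b < x) →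
      ((L.foldl (fun best j => if g j then (match best with | none => some j | some b => if |j - t| < |b - t| then some j else best) else best) acc = none →
          acc = none ∧ ∀ x ∈ L, g x = false) ∧
       (∀ m, L.foldl (fun best j => if g j then (match best with | none => some j | some b => if |j - t| < |b - t| then some j else best) else best) acc = some m →
          g m = true ∧ (acc = some m ∨ m ∈ L) ∧
          (∀ x ∈ L, g x = true → x = m ∨ pvKlt t m x) ∧
          (∀ b, acc = some b → b = m ∨ |m - t| < |b - t|))) := by
  intro L
  induction L with
  | nil =>
    intro acc _ hacc
    refine ⟨fun hr => ⟨hr, by simp⟩, ?_⟩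
    intro m hm
    simp only [List.foldl_nil] at hm
    exact ⟨(hacc m hm).1, Or.inl hm, by simp,
      fun b hb => Or.inl (Option.some.inj (hb.symm.trans hm))⟩
  | cons j L ih =>
    intro acc hpw hacc
    rw [List.pairwise_cons] at hpw
    obtain ⟨hhead, htail⟩ := hpw
    simp only [List.foldl_cons]
    by_cases hg : g j = true
    · cases acc with
      | none =>
        simp only [hg, if_true]
        obtain ⟨ihn, ihs⟩ := ih (some j) htail
          (fun b hb => by injection hb with hb; subst hb; exact ⟨hg, hhead⟩)
        refine ⟨fun hr => absurd (ihn hr).1 (by simp), ?_⟩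
        intro m hm
        obtain ⟨h1, h2, h3, h4⟩ := ihs m hm
        refine ⟨h1, Or.inr ?_, ?_, by simp⟩
        · rcases h2 with hjm | hmL
          · exact List.mem_cons.mpr (Or.inl (Option.some.inj hjm).symm)
          · exact List.mem_cons.mpr (Or.inr hmL)
        · intro x hx hgx
          rcases List.mem_cons.mp hx with rfl | hxL
          · rcases h4 x rfl with rfl | hlt
            · exact Or.inl rfl
            · exact Or.inr (Or.inl hlt)
          · exact h3 x hxL hgx
      | some b0 =>
        have hb0 := hacc b0 rfl
        by_cases hlt : |j - t| < |b0 - t|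
        · simp only [hg, hlt, if_pos]
          obtain ⟨ihn, ihs⟩ := ih (some j) htail
            (fun b hb => by injection hb with hb; subst hb; exact ⟨hg, hhead⟩)
          refine ⟨fun hr => absurd (ihn hr).1 (by simp), ?_⟩
          intro m hm
          obtain ⟨h1, h2, h3, h4⟩ := ihs m hm
          have hmj : |m - t| ≤ |j - t| := by
            rcases h4 j rfl with rfl | h
            · exact le_refl _
            · exact le_of_lt h
          refine ⟨h1, Or.inr ?_, ?_, ?_⟩
          · rcases h2 with hjm | hmL
            · exact List.mem_cons.mpr (Or.inl (Option.some.inj hjm).symm)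
            · exact List.mem_cons.mpr (Or.inr hmL)
          · intro x hx hgx
            rcases List.mem_cons.mp hx with rfl | hxL
            · rcases h4 x rfl with rfl | h
              · exact Or.inl rfl
              · exact Or.inr (Or.inl h)
            · exact h3 x hxL hgx
          · intro b hb
            injection hb with hb; subst hb
            exact Or.inr (lt_of_le_of_lt hmj hlt)
        · simp only [hg, if_true, hlt, if_false]
          obtain ⟨ihn, ihs⟩ := ih (some b0) htail
            (fun b hb => by
              injection hb with hb; subst hb
              exact ⟨hb0.1, fun x hx => hb0.2 x (List.mem_cons.mpr (Or.inr hx))⟩)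
          refine ⟨fun hr => absurd (ihn hr).1 (by simp), ?_⟩
          intro m hm
          obtain ⟨h1, h2, h3, h4⟩ := ihs m hm
          have hjb0 : |b0 - t| ≤ |j - t| := not_lt.mp hlt
          refine ⟨h1, ?_, ?_, ?_⟩
          · rcases h2 with hbm | hmL
            · exact Or.inl hbm
            · exact Or.inr (List.mem_cons.mpr (Or.inr hmL))
          · intro x hx hgx
            rcases List.mem_cons.mp hx with rfl | hxL
            · -- x = j: show j = m ∨ pvKlt t m j
              rcases h4 b0 rfl with hbm | h
              · rcases lt_or_eq_of_le hjb0 with h' | h'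
                · exact Or.inr (Or.inl (hbm ▸ h'))
                · refine Or.inr (Or.inr ⟨?_, ?_⟩)
                  · rw [← hbm]; exact h'
                  · rw [← hbm]; exact hb0.2 x (List.mem_cons.mpr (Or.inl rfl))
              · exact Or.inr (Or.inl (lt_of_lt_of_le h hjb0))
            · exact h3 x hxL hgx
          · intro b hb
            injection hb with hb; subst hb
            exact h4 b0 rfl
    · have hg' : g j = false := by simpa using hg
      simp only [hg', Bool.false_eq_true, if_false]
      obtain ⟨ihn, ihs⟩ := ih acc htail
        (fun b hb => ⟨(hacc b hb).1, fun x hx => (hacc b hb).2 x (List.mem_cons.mpr (Or.inr hx))⟩)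
      refine ⟨?_, ?_⟩
      · intro hr
        obtain ⟨h1, h2⟩ := ihn hr
        refine ⟨h1, ?_⟩
        intro x hx
        rcases List.mem_cons.mp hx with rfl | hxL
        · exact hg'
        · exact h2 x hxL
      · intro m hm
        obtain ⟨h1, h2, h3, h4⟩ := ihs m hm
        refine ⟨h1, ?_, ?_, h4⟩
        · rcases h2 with h | h
          · exact Or.inl h
          · exact Or.inr (List.mem_cons.mpr (Or.inr h))
        · intro x hx hgx
          rcases List.mem_cons.mp hx with rfl | hxL
          · rw [hg'] at hgx; exact absurd hgx (by simp)
          · exact h3 x hxL hgx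

lemma pvKlt_asymm {t a b : Int} (h1 : pvKlt t a b) (h2 : pvKlt t b a) : False := by
  unfold pvKlt at h1 h2
  rcases h1 with h1 | ⟨e1, l1⟩ <;> rcases h2 with h2 | ⟨e2, l2⟩
  · exact absurd h2 (not_lt.mpr (le_of_lt h1))
  · exact absurd h1 (not_lt.mpr (le_of_eq e2))
  · exact absurd h2 (not_lt.mpr (le_of_eq e1))
  · exact absurd l2 (not_lt.mpr (le_of_lt l1))

lemma key_equiv (t : Int) (g : Int → Bool) :
    (PySem.List.sorted2 (PySem.List.pyRange 0 11 1) (fun x => |x - t|) (fun x => x)).find? g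
      = (PySem.List.pyRange 0 11 1).foldl
          (fun best j => if g j then (match best with | none => some j | some b => if |j - t| < |b - t| then some j else best) else best) none := by
  rw [sorted2_eq_sortedK]
  have hperm := PySem.List.sorted_perm (PySem.List.pyRange 0 11 1) (pvK t) false
  obtain ⟨hAs, hAn⟩ := find?_char t g _ (sortedK_pairwise t)
  obtain ⟨hBn, hBs⟩ := foldl_char t g (PySem.List.pyRange 0 11 1) none
    (by rw [pvRange_eq]; decide) (by simp)
  cases hfa : (PySem.List.sorted (PySem.List.pyRange 0 11 1) (pvK t)).find? g with
  | none =>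
    cases hfb : (PySem.List.pyRange 0 11 1).foldl
        (fun best j => if g j then (match best with | none => some j | some b => if |j - t| < |b - t| then some j else best) else best) none with
    | none => rfl
    | some m =>
      obtain ⟨h1, h2, _, _⟩ := hBs m hfb
      rcases h2 with h | h
      · exact absurd h (by simp)
      · exact absurd h1 (by simp [hAn hfa m (hperm.mem_iff.mpr h)])
  | some m1 =>
    obtain ⟨hg1, hm1S, hmin1⟩ := hAs m1 hfa
    cases hfb : (PySem.List.pyRange 0 11 1).foldl
        (fun best j => if g j then (match best with | none => some j | some b => if |j - t| < |b - t| then some j else best) else best) none with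
    | none =>
      obtain ⟨_, hall⟩ := hBn hfb
      exact absurd hg1 (by simp [hall m1 (hperm.mem_iff.mp hm1S)])
    | some m2 =>
      obtain ⟨hg2, hm2, hmin2, _⟩ := hBs m2 hfb
      rcases hm2 with h | hm2L
      · exact absurd h (by simp)
      · have e1 := hmin1 m2 (hperm.mem_iff.mpr hm2L) hg2
        have e2 := hmin2 m1 (hperm.mem_iff.mp hm1S) hg1
        rcases e1 with rfl | k1
        · rfl
        · rcases e2 with rfl | k2
          · rfl
          · exact absurd (pvKlt_asymm k1 k2) (fun h => h)

-- ===== VERDICT (by name: the statement is the Claim_ definition above) =====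
theorem nearest_join_with_examples_spec : Claim_equal_nearest_join_with_examples := by
  intro target_j buckets _
  show nearest_join_with_examples target_j buckets = nearest_join_with_examples_alt target_j buckets
  unfold nearest_join_with_examples nearest_join_with_examples_alt
  by_cases h : pvGetTruthy buckets target_j = true
  · simp [h]
  · simp only [Bool.not_eq_true] at h
    simp only [h, Bool.false_eq_true, if_false]
    exact key_equiv target_j (fun j => pvGetTruthy buckets j)
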